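-- pv_equiv track=rewrite | github.com/FlandreDong/nys-parks-need-score-tool | pipeline/demand_excel_reader.py | _sheet_order
-- ===== SOURCE A (Python) =====
-- def _sheet_order(names: list[str]) -> list[str]:
--     preferred: list[str] = []
--     for key in ("sheet1", "demand", "d8", "m4", "data"):
--         for s in names:
--             if str(s).strip().lower() == key:
--                 preferred.append(s)
--                 break
--     rest = [s for s in names if s not in preferred]
--     return preferred + rest
-- ===== SOURCE B (Python) =====
-- def _sheet_order(names: list[str]) -> list[str]:
--     keys = ("sheet1", "demand", "d8", "m4", "data")
--     found = {}
--     for s in names: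
--         n = str(s).strip().lower()
--         if n in keys and n not in found:
--             found[n] = s
--     preferred = [found[k] for k in keys if k in found]
--     rest = [s for s in names if s not in preferred]
--     return preferred + rest
-- ===== Notes on version B (the rewrite author's own statement) =====
-- stated objective: faster
-- what changed: One pass over names builds a dict mapping each preferred normalized key to its first occurrence, then the output is assembled in key order; this replaces A's five full scans of names (one per key) with a single scan plus a 5-key lookup pass.
import Mathlib
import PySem

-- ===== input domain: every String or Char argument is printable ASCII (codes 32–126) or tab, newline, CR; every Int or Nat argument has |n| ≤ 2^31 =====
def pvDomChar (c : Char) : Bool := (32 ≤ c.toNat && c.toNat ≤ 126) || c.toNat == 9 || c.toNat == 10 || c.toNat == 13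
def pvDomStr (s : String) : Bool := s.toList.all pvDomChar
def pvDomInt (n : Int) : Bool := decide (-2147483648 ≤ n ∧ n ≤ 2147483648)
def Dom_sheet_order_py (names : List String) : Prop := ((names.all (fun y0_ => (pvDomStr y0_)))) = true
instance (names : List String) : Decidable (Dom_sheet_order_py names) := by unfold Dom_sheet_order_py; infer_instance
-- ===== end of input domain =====

-- B builds a first-occurrence dict for the five preferred keys in one pass over names, then assembles the output in key order (A scans names once per key).


-- ===== PORT A =====
-- str(s).strip().lower()
def pyNorm (s : String) : String := PySem.Str.lower (PySem.Str.strip s)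

-- for key in (...): for s in names: if norm s == key: append; break  — the inner
-- for-with-break is the first match in names, i.e. List.find?
def sheet_order_py (names : List String) : List String :=
  let preferred := ["sheet1", "demand", "d8", "m4", "data"].foldl
    (fun acc key =>
      match names.find? (fun s => pyNorm s == key) with
      | some s => acc ++ [s]
      | none => acc) []
  let rest := names.filter (fun s => !(preferred.contains s))
  preferred ++ rest

-- ===== PORT B =====

-- the body of B's single for-loop: record s under its normalized form if it is a
-- still-unseen preferred key
def stepB (keys : List String) (d : PySem.Dict String String) (s : String) :
    PySem.Dict String String :=
  let n := pyNorm s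
  if keys.contains n && !(d.contains n) then d.insert n s else d

def sheet_order_py_alt (names : List String) : List String :=
  let keys := ["sheet1", "demand", "d8", "m4", "data"]
  let found := names.foldl (stepB keys) (PySem.Dict.empty : PySem.Dict String String)
  let preferred := keys.filterMap (fun k => found.get? k)
  let rest := names.filter (fun s => !(preferred.contains s))
  preferred ++ rest

-- ===== PRECONDITION & SPEC =====
def Spec_sheet_order_py (names : List String) (out : List String) : Prop := out = sheet_order_py_alt names
instance (names : List String) (out : List String) : Decidable (Spec_sheet_order_py names out) := by unfold Spec_sheet_order_py; infer_instance

-- ===== CLAIM (what is proved, stated in full; the proofs are below) =====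
def Claim_equal_sheet_order_py : Prop := ∀ (names : List String), Dom_sheet_order_py names → Spec_sheet_order_py names (sheet_order_py names)

-- ===== LEMMAS AND PROOFS =====

-- the dict built by B's one pass answers, for any preferred key, with the first
-- matching element of the scanned list (on top of whatever the dict already holds)
theorem found_get? (keys : List String) (l : List String)
    (d : PySem.Dict String String) (k : String) (hk : keys.contains k = true) :
    (l.foldl (stepB keys) d).get? k
      = (d.get? k).or (l.find? (fun s => pyNorm s == k)) := by
  induction l generalizing d with
  | nil => simp
  | cons s l ih =>
    rw [List.foldl_cons, ih, List.find?_cons]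
    by_cases hn : pyNorm s = k
    · subst hn
      by_cases hc : d.contains (pyNorm s) = true
      · have hsome : (d.get? (pyNorm s)).isSome := by
          rw [← PySem.Dict.contains_eq_isSome_get?]; exact hc
        obtain ⟨v, hv⟩ := Option.isSome_iff_exists.mp hsome
        have hs : stepB keys d s = d := by simp [stepB, hc]
        simp [hs, hv, Option.or]
      · have hc' : d.contains (pyNorm s) = false := by simpa using hc
        have hnone : d.get? (pyNorm s) = none := by
          have h2 := PySem.Dict.contains_eq_isSome_get? d (pyNorm s)
          rw [hc'] at h2
          exact Option.not_isSome_iff_eq_none.mp (by simp [← h2])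
        have hkm : pyNorm s ∈ keys := by simpa [List.contains_iff_mem] using hk
        have hs : stepB keys d s = d.insert (pyNorm s) s := by
          simp [stepB, hkm, hc']
        simp [hs, hnone, PySem.Dict.get?_insert_self, Option.or]
    · have hb : (pyNorm s == k) = false := by simpa using hn
      have hne : k ≠ pyNorm s := fun h => hn h.symm
      by_cases hstep : (keys.contains (pyNorm s) && !(d.contains (pyNorm s))) = true
      · obtain ⟨h1, h2⟩ : pyNorm s ∈ keys ∧ d.contains (pyNorm s) = false := by
          simpa [List.contains_iff_mem] using hstep
        have hs : stepB keys d s = d.insert (pyNorm s) s := by simp [stepB, h1, h2]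
        rw [hs, PySem.Dict.get?_insert_of_ne d s hne]
        simp [hb]
      · have hs : stepB keys d s = d := by
          simp only [stepB]
          rw [if_neg hstep]
        simp [hs, hb]

-- A's key loop with append accumulates exactly filterMap of the per-key result
theorem foldl_match_filterMap (ks : List String) (f : String → Option String)
    (acc : List String) :
    ks.foldl (fun acc k =>
        match f k with
        | some s => acc ++ [s]
        | none => acc) acc = acc ++ ks.filterMap f := by
  induction ks generalizing acc with
  | nil => simp
  | cons k ks ih =>
    simp only [List.foldl_cons, List.filterMap_cons]
    cases h : f k with
    | some s => simp [h, ih]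
    | none => simp [h, ih]

-- ===== VERDICT (by name: the statement is the Claim_ definition above) =====
theorem sheet_order_py_spec : Claim_equal_sheet_order_py := by
  intro names _
  unfold Spec_sheet_order_py sheet_order_py sheet_order_py_alt
  simp only
  rw [foldl_match_filterMap]
  have hpre :
      (["sheet1", "demand", "d8", "m4", "data"]).filterMap
          (fun key => names.find? (fun s => pyNorm s == key))
        = (["sheet1", "demand", "d8", "m4", "data"]).filterMap
          (fun k => (names.foldl (stepB ["sheet1", "demand", "d8", "m4", "data"])
            (PySem.Dict.empty : PySem.Dict String String)).get? k) := by
    apply List.filterMap_congr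
    intro k hk
    rw [found_get? _ _ _ _ (by simpa [List.contains_iff_mem] using hk)]
    simp [pyNorm, pyNorm, Option.or]
  simp only [List.nil_append, hpre]
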